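-- pv_equiv track=rewrite | github.com/aidenrism/TIL | SWEA/1860_진기의최고급붕어빵/sol1_sub.py | fishcake
-- ===== SOURCE A (Python) =====
-- def fishcake(m, k, people):
--     # people = q_sort(people)
--     n = len(people)
--     i = 0
--     fish = 0
--     result = 1
--     latest = 0
--
--     while n > 0:
--         fish += ((people[i] - latest)// m) * k
--         latest = (people[i]//m) * m
--         if fish > 0:
--             fish -= 1
--             n -= 1
--             i += 1
--         else:
--             result = 0
--             break
--     #     if n > 0:
--     #         continue
--         if n == 0 and fish > 0:
--             result = 1
--             break
--     #         break
--     #     if fish <= 0: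
--     #         result = 0
--     if result:
--         return 'Possible'
--     else:
--         return 'Impossible'
-- ===== SOURCE B (Python) =====
-- def fishcake(m, k, people):
--     # After serving person i (0-based), the stock is (people[i]//m)*k - i,
--     # because production telescopes (latest served time is a multiple of m).
--     for i, p in enumerate(people):
--         if (p // m) * k <= i:
--             return 'Impossible'
--     return 'Possible'
-- ===== Notes on version B (the rewrite author's own statement) =====
-- stated objective: simpler
-- what changed: Replaces the stateful fish/latest simulation loop with a single pass that checks each person against the closed-form stock (p//m)*k - i, since production telescopes.
import Mathlib
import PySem

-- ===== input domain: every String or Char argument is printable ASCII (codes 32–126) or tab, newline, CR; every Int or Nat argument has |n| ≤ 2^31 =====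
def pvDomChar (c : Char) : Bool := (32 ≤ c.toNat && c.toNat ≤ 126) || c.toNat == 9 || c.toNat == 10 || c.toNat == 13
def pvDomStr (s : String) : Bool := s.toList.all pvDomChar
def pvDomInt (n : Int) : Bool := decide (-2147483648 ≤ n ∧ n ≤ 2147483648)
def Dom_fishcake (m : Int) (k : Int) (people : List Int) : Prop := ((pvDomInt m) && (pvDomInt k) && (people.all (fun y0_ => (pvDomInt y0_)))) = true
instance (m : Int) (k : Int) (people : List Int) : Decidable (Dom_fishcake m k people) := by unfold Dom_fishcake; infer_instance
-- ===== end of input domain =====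

-- B replaces A's stateful fish/latest simulation with a per-person closed-form check; objective: simpler.

-- ===== PORT A =====
-- while-loop of A: state (n, i, fish, latest); n is the remaining count and strictly decreases.
def fishcakeLoop (m : Int) (k : Int) (people : List Int) :
    Nat → Nat → Int → Int → String
  | 0, _, _, _ => "Possible"                      -- while condition n > 0 fails, result = 1
  | n + 1, i, fish, latest =>
    match PySem.List.pyGet? people (i : Int) with
    | none => "Impossible"                        -- IndexError (unreachable under Pre_)
    | some p =>
      let fish := fish + (PySem.Int.floordiv (p - latest) m) * k
      let latest := (PySem.Int.floordiv p m) * m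
      if fish > 0 then
        let fish := fish - 1
        if n = 0 ∧ fish > 0 then "Possible"       -- the 'if n == 0 and fish > 0' break
        else fishcakeLoop m k people n (i + 1) fish latest
      else "Impossible"                           -- result = 0; break

def fishcake (m : Int) (k : Int) (people : List Int) : String :=
  fishcakeLoop m k people people.length 0 0 0

-- ===== PORT B =====
def fishcakeAltLoop (m : Int) (k : Int) : List Int → Nat → String
  | [], _ => "Possible"
  | p :: rest, i =>
    if (PySem.Int.floordiv p m) * k ≤ (i : Int) then "Impossible"
    else fishcakeAltLoop m k rest (i + 1)

def fishcake_alt (m : Int) (k : Int) (people : List Int) : String :=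
  fishcakeAltLoop m k people 0

-- ===== PRECONDITION & SPEC =====
-- Pre_ excludes only inputs where A raises: m = 0 with nonempty people (ZeroDivisionError).
def Pre_fishcake (m : Int) (k : Int) (people : List Int) : Prop := m ≠ 0 ∨ people = []
instance (m : Int) (k : Int) (people : List Int) : Decidable (Pre_fishcake m k people) := by
  unfold Pre_fishcake; infer_instance

def pvWitness_fishcake : Int × Int × List Int := (3, 2, [4, 5, 7])

def Spec_fishcake (m : Int) (k : Int) (people : List Int) (out : String) : Prop := out = fishcake_alt m k people
instance (m : Int) (k : Int) (people : List Int) (out : String) : Decidable (Spec_fishcake m k people out) := by unfold Spec_fishcake; infer_instance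

-- ===== CLAIM (what is proved, stated in full; the proofs are below) =====
def Claim_equal_fishcake : Prop := ∀ (m : Int) (k : Int) (people : List Int), Dom_fishcake m k people → Pre_fishcake m k people → Spec_fishcake m k people (fishcake m k people)

-- ===== LEMMAS AND PROOFS =====

-- Telescoping of the production: subtracting a multiple of m shifts the floor quotient.
lemma floordiv_sub_mul (m p c : Int) (hm : m ≠ 0) :
    PySem.Int.floordiv (p - c * m) m = PySem.Int.floordiv p m - c := by
  simp only [PySem.Int.floordiv]
  have h : p - c * m = p + (-c) * m := by ring
  rw [h, Int.add_mul_fdiv_right p (-c) hm]; ring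

-- Loop invariant: at index i with latest = c*m and fish = c*k - i, A's loop equals B's loop
-- on the remaining suffix.
lemma loop_eq (m k : Int) (people : List Int) (hm : m ≠ 0) :
    ∀ (rest : List Int) (i : Nat) (c : Int), people.drop i = rest →
      fishcakeLoop m k people rest.length i (c * k - (i : Int)) (c * m)
        = fishcakeAltLoop m k rest i := by
  intro rest
  induction rest with
  | nil => intro i c _; simp [fishcakeLoop, fishcakeAltLoop]
  | cons p t ih =>
    intro i c hdrop
    have hi : i < people.length := by
      by_contra h
      simp [List.drop_eq_nil_of_le (Nat.le_of_not_lt h)] at hdrop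
    have hget : PySem.List.pyGet? people (i : Int) = some p := by
      rw [PySem.List.pyGet?_natCast]
      have : people[i]? = (people.drop i)[0]? := by
        simp [List.getElem?_drop]
      rw [this, hdrop]; rfl
    have hfd : PySem.Int.floordiv (p - c * m) m = PySem.Int.floordiv p m - c :=
      floordiv_sub_mul m p c hm
    rw [List.length_cons]
    simp only [fishcakeLoop, fishcakeAltLoop, hget, hfd]
    have hfish : c * k - (i : Int) + (PySem.Int.floordiv p m - c) * k
        = PySem.Int.floordiv p m * k - (i : Int) := by ring
    rw [hfish]
    by_cases hcond : PySem.Int.floordiv p m * k ≤ (i : Int)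
    · have : ¬ (PySem.Int.floordiv p m * k - (i : Int) > 0) := by omega
      simp [this, hcond]
    · have hpos : PySem.Int.floordiv p m * k - (i : Int) > 0 := by omega
      simp only [hpos, if_pos, hcond, if_neg]
      have hdrop' : people.drop (i + 1) = t := by
        rw [← List.drop_drop, hdrop]; rfl
      have hrec := ih (i + 1) (PySem.Int.floordiv p m) hdrop'
      have harg : PySem.Int.floordiv p m * k - (i : Int) - 1
          = PySem.Int.floordiv p m * k - ((i + 1 : Nat) : Int) := by push_cast; ring
      by_cases ht : t.length = 0
      · -- t = []: either the early break or the n = 0 base case, both "Possible"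
        have ht' : t = [] := List.eq_nil_of_length_eq_zero ht
        subst ht'
        by_cases hf : PySem.Int.floordiv p m * k - (i : Int) - 1 > 0
        · simp only [List.length_nil, hf, and_true, if_pos]
          simp [fishcakeAltLoop]
        · simp [fishcakeLoop, fishcakeAltLoop, hf]
      · have hne : ¬ (t.length = 0 ∧ PySem.Int.floordiv p m * k - (i : Int) - 1 > 0) := by
          intro h; exact ht h.1
        rw [if_neg hne, harg, hrec]
        simp

-- ===== VERDICT (by name: the statement is the Claim_ definition above) =====
theorem fishcake_spec : Claim_equal_fishcake := by
  intro m k people _ hpre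
  unfold Spec_fishcake fishcake fishcake_alt
  cases hpre with
  | inl hm =>
    have := loop_eq m k people hm people 0 0 rfl
    simpa using this
  | inr hnil => subst hnil; rfl
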